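-- pv_equiv track=rewrite | github.com/imn00133/algorithm | ItIsCodingTest/chap11/06.muji_mukbang_live.py | find_final_food_index
-- ===== SOURCE A (Python) =====
-- def find_final_food_index(food_times_index, k):
--     prev_food_time = 0
--     prev_food_index = 0
--     for index, (food_time, food_index) in enumerate(food_times_index):
--         if food_time == prev_food_time:
--             continue
--
--         current_food_time = food_time - prev_food_time
--         remainder_len = len(food_times_index) - index
--         next_k = k - (current_food_time * remainder_len)
--
--         if next_k >= 0:
--             prev_food_time = food_time
--             prev_food_index = food_index
--             k = next_k
--             continue
--
--         return prev_food_time, prev_food_index, ((k + 1) % remainder_len)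
--
--     return -1, -1, -1
-- ===== SOURCE B (Python) =====
-- def find_final_food_index(food_times_index, k):
--     # Two-phase: build a table of distinct-time layers with cumulative costs,
--     # then search it once against the original k (no incremental subtraction).
--     n = len(food_times_index)
--     layers = []  # (cum_after, cum_before, prev_time, prev_index, layer_index)
--     prev_t, prev_i, cum = 0, 0, 0
--     for i, (t, idx) in enumerate(food_times_index):
--         if t != prev_t:
--             cum_after = cum + (t - prev_t) * (n - i)
--             layers.append((cum_after, cum, prev_t, prev_i, i))
--             cum = cum_after
--             prev_t, prev_i = t, idx
--     for cum_after, cum_before, pt, pi, i in layers: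
--         if cum_after > k:
--             return pt, pi, (k - cum_before + 1) % (n - i)
--     return -1, -1, -1
-- ===== Notes on version B (the rewrite author's own statement) =====
-- stated objective: alternative
-- what changed: B replaces A's single incremental scan that mutates k and the prev-state as it goes with a two-phase table approach: first build a table of distinct-time layers carrying cumulative costs, then search that table once against the untouched original k and recover the answer from the stored cumulative-before value.
import Mathlib
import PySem

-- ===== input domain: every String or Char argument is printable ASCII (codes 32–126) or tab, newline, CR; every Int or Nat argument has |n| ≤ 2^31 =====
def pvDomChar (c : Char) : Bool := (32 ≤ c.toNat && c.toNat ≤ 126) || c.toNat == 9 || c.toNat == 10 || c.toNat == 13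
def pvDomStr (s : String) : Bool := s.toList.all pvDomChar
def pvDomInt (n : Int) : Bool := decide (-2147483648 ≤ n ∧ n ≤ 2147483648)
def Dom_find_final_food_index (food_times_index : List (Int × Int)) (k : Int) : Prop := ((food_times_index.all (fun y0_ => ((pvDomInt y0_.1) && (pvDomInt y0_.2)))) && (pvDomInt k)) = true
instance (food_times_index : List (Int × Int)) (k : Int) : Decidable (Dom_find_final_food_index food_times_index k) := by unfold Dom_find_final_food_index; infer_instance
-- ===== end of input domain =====

-- B builds a cumulative-cost layer table and searches it once against the original k,
-- instead of A's incremental scan that mutates k; an alternative decomposition, same cost.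


-- ===== PORT A =====
-- A's for-loop over enumerate with mutable prev_food_time/prev_food_index/k,
-- as structural recursion with index i and total length n.
def ffiA_loop (rest : List (Int × Int)) (i n : Nat) (prev_t prev_i k : Int) : Int × Int × Int :=
  match rest with
  | [] => (-1, -1, -1)
  | (t, idx) :: rs =>
    if t = prev_t then ffiA_loop rs (i+1) n prev_t prev_i k
    else
      let current_food_time := t - prev_t
      let remainder_len : Int := (n : Int) - (i : Int)
      let next_k := k - current_food_time * remainder_len
      if next_k ≥ 0 then ffiA_loop rs (i+1) n t idx next_k
      else (prev_t, prev_i, PySem.Int.mod (k + 1) remainder_len)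

def find_final_food_index (food_times_index : List (Int × Int)) (k : Int) : Int × Int × Int :=
  ffiA_loop food_times_index 0 food_times_index.length 0 0 k

-- ===== PORT B =====
-- phase 1: build the layer table (cum_after, cum_before, prev_time, prev_index, layer_index)
def ffiB_build (rest : List (Int × Int)) (i n : Nat) (prev_t prev_i cum : Int) :
    List (Int × Int × Int × Int × Int) :=
  match rest with
  | [] => []
  | (t, idx) :: rs =>
    if t ≠ prev_t then
      let cum_after := cum + (t - prev_t) * ((n : Int) - (i : Int))
      (cum_after, cum, prev_t, prev_i, (i : Int)) :: ffiB_build rs (i+1) n t idx cum_after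
    else ffiB_build rs (i+1) n prev_t prev_i cum

-- phase 2: first layer whose cumulative cost exceeds the original k
def ffiB_find (layers : List (Int × Int × Int × Int × Int)) (k : Int) (n : Nat) : Int × Int × Int :=
  match layers with
  | [] => (-1, -1, -1)
  | (cum_after, cum_before, pt, pi, i) :: rs =>
    if cum_after > k then (pt, pi, PySem.Int.mod (k - cum_before + 1) ((n : Int) - i))
    else ffiB_find rs k n

def find_final_food_index_alt (food_times_index : List (Int × Int)) (k : Int) : Int × Int × Int :=
  ffiB_find (ffiB_build food_times_index 0 food_times_index.length 0 0 0) k food_times_index.length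

-- ===== PRECONDITION & SPEC =====
def Spec_find_final_food_index (food_times_index : List (Int × Int)) (k : Int) (out : Int × Int × Int) : Prop := out = find_final_food_index_alt food_times_index k
instance (food_times_index : List (Int × Int)) (k : Int) (out : Int × Int × Int) : Decidable (Spec_find_final_food_index food_times_index k out) := by unfold Spec_find_final_food_index; infer_instance

-- ===== CLAIM (what is proved, stated in full; the proofs are below) =====
def Claim_equal_find_final_food_index : Prop := ∀ (food_times_index : List (Int × Int)) (k : Int), Dom_find_final_food_index food_times_index k → Spec_find_final_food_index food_times_index k (find_final_food_index food_times_index k)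

-- ===== LEMMAS AND PROOFS =====
-- Invariant: A's mutated k equals the original k minus the accumulated cost cum.
theorem ffi_loop_eq (rest : List (Int × Int)) :
    ∀ (i n : Nat) (pt pi cum k : Int),
      ffiA_loop rest i n pt pi (k - cum) =
        ffiB_find (ffiB_build rest i n pt pi cum) k n := by
  induction rest with
  | nil => intro i n pt pi cum k; simp [ffiA_loop, ffiB_build, ffiB_find]
  | cons hd rs ih =>
    intro i n pt pi cum k
    obtain ⟨t, idx⟩ := hd
    by_cases h : t = pt
    · simp [ffiA_loop, ffiB_build, h, ih]
    · simp only [ffiA_loop, ffiB_build, if_neg h, if_pos h, ffiB_find]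
      by_cases h2 : cum + (t - pt) * ((n : Int) - (i : Int)) > k
      · have : ¬ (k - cum - (t - pt) * ((n : Int) - (i : Int)) ≥ 0) := by omega
        simp only [if_neg this, if_pos h2]
      · have : k - cum - (t - pt) * ((n : Int) - (i : Int)) ≥ 0 := by omega
        simp only [if_pos this, if_neg h2]
        have : k - cum - (t - pt) * ((n : Int) - (i : Int)) =
            k - (cum + (t - pt) * ((n : Int) - (i : Int))) := by ring
        rw [this, ih]

-- ===== VERDICT (by name: the statement is the Claim_ definition above) =====
theorem find_final_food_index_spec : Claim_equal_find_final_food_index := by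
  intro fti k _
  unfold Spec_find_final_food_index find_final_food_index find_final_food_index_alt
  have := ffi_loop_eq fti 0 fti.length 0 0 0 k
  simpa using this
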